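-- pv_equiv track=rewrite | github.com/BuczynskiRafal/Exercise-python | 23 algorytmy - grafy/03 zapis grafu za pomocą macierzy.py | translate_to_matrix
-- ===== SOURCE A (Python) =====
-- def translate_to_matrix(V, E):
--     v_range = range(len(V))
--     matrix = []
--     for v1 in v_range:
--         row = []
--         for v2 in v_range:
--             if {v1, v2} in E:
--                 row.append(1)
--             else:
--                 row.append(0)
--         matrix.append(row)
--     return matrix
-- ===== SOURCE B (Python) =====
-- def translate_to_matrix(V, E):
--     n = len(V)
--     matrix = [[0] * n for _ in range(n)]
--     for e in E:
--         vs = list(e)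
--         if len(vs) == 1:
--             a = vs[0]
--             if 0 <= a < n:
--                 matrix[a][a] = 1
--         elif len(vs) == 2:
--             a, b = vs
--             if 0 <= a < n and 0 <= b < n:
--                 matrix[a][b] = 1
--                 matrix[b][a] = 1
--     return matrix
-- ===== Notes on version B (the rewrite author's own statement) =====
-- stated objective: faster
-- what changed: B allocates an n-by-n zero matrix once and writes the 1-cells in a single pass over the edge set, instead of scanning all n^2 cells and testing '{v1,v2} in E' (a linear scan of E) for each cell.
import Mathlib
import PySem

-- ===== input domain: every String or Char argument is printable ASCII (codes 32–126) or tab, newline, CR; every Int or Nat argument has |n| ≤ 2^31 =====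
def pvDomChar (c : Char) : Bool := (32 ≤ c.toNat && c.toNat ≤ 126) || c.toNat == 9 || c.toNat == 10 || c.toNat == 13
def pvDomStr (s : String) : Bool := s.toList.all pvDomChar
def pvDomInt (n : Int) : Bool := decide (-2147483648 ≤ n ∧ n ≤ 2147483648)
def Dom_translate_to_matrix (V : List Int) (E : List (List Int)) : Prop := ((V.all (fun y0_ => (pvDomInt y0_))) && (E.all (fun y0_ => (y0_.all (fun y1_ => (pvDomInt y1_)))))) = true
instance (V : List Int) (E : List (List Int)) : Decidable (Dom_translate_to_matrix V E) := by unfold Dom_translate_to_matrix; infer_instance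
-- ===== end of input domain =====

-- B builds the matrix by a single pass over the edges (writing the 1-cells) instead of
-- scanning all n^2 cells and searching E for each.

-- ===== PORT A =====
-- {v1, v2} built by two set.add's; 'in E' tests Python set equality against each member of E
def pvPairSet (x y : Int) : PySem.Set Int :=
  PySem.Set.add (PySem.Set.add PySem.Set.empty x) y

def translate_to_matrix (V : List Int) (E : List (List Int)) : List (List Int) :=
  let n : Int := PySem.List.len V
  (PySem.List.pyRange 0 n 1).foldl (fun matrix v1 =>
    matrix ++ [(PySem.List.pyRange 0 n 1).foldl (fun row v2 =>
      row ++ [if E.any (fun e => PySem.Set.equal (pvPairSet v1 v2) e) then (1 : Int) else 0]) []]) []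

-- ===== PORT B =====
-- matrix[a][b] = 1 (indices guaranteed in range by the guard just above the write)
def pvSetCell (m : List (List Int)) (a b : Nat) : List (List Int) :=
  m.set a ((m.getD a []).set b 1)

def pvStep (n : Int) (m : List (List Int)) (e : List Int) : List (List Int) :=
  match e with
  | [a] => if 0 ≤ a ∧ a < n then pvSetCell m a.toNat a.toNat else m
  | [a, b] =>
      if (0 ≤ a ∧ a < n) ∧ (0 ≤ b ∧ b < n) then
        pvSetCell (pvSetCell m a.toNat b.toNat) b.toNat a.toNat
      else m
  | _ => m

def translate_to_matrix_alt (V : List Int) (E : List (List Int)) : List (List Int) :=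
  E.foldl (pvStep (V.length : Int)) (List.replicate V.length (List.replicate V.length 0))

-- ===== PRECONDITION & SPEC =====
-- The members of E are Python SETS; under the type convention a set is encoded as the list of
-- its DISTINCT elements, so Pre_ only states that the encoding is well-formed (no Python input
-- is excluded: every Python set satisfies it).
def Pre_translate_to_matrix (V : List Int) (E : List (List Int)) : Prop :=
  ∀ e ∈ E, e.Nodup
instance (V : List Int) (E : List (List Int)) : Decidable (Pre_translate_to_matrix V E) := by
  unfold Pre_translate_to_matrix; infer_instance

def pvWitness_translate_to_matrix : List Int × List (List Int) := ([0, 5], [[0, 1]])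

def Spec_translate_to_matrix (V : List Int) (E : List (List Int)) (out : List (List Int)) : Prop :=
  out = translate_to_matrix_alt V E
instance (V : List Int) (E : List (List Int)) (out : List (List Int)) : Decidable (Spec_translate_to_matrix V E out) := by
  unfold Spec_translate_to_matrix; infer_instance

-- ===== CLAIM =====
def Claim_equal_translate_to_matrix : Prop := ∀ (V : List Int) (E : List (List Int)), Dom_translate_to_matrix V E → Pre_translate_to_matrix V E → Spec_translate_to_matrix V E (translate_to_matrix V E)

-- ===== LEMMAS AND PROOFS =====

-- the cell (i, j) of a matrix, and the shape invariant maintained by B's fold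
def pvGetCell (m : List (List Int)) (i j : Nat) : Int := (m.getD i []).getD j 0

def pvShape (m : List (List Int)) (n : Nat) : Prop :=
  m.length = n ∧ ∀ row ∈ m, row.length = n

-- does edge e write cell (i, j)?
def pvHits (n : Nat) (e : List Int) (i j : Nat) : Bool :=
  match e with
  | [a] => decide (0 ≤ a ∧ a < (n : Int) ∧ a.toNat = i ∧ a.toNat = j)
  | [a, b] => decide ((0 ≤ a ∧ a < (n : Int)) ∧ (0 ≤ b ∧ b < (n : Int)) ∧
      ((a.toNat = i ∧ b.toNat = j) ∨ (b.toNat = i ∧ a.toNat = j)))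
  | _ => false

theorem foldl_append_map {α β : Type} (f : α → β) :
    ∀ (l : List α) (init : List β),
      l.foldl (fun acc x => acc ++ [f x]) init = init ++ l.map f := by
  intro l
  induction l with
  | nil => intro init; simp
  | cons x xs ih => intro init; simp [List.foldl, ih]

theorem A_char (V : List Int) (E : List (List Int)) :
    translate_to_matrix V E =
      (List.range V.length).map (fun (i : Nat) =>
        (List.range V.length).map (fun (j : Nat) =>
          if E.any (fun e => PySem.Set.equal (pvPairSet ((i : Nat) : Int) ((j : Nat) : Int)) e) then (1 : Int) else 0)) := by
  unfold translate_to_matrix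
  simp only [foldl_append_map, List.nil_append, PySem.List.pyRange_one, PySem.List.len,
    List.map_map]
  norm_num [Function.comp]

theorem shape_setCell (m : List (List Int)) (n a b : Nat) (hm : pvShape m n)
    (ha : a < n) : pvShape (pvSetCell m a b) n := by
  obtain ⟨hlen, hrow⟩ := hm
  refine ⟨by simp [pvSetCell, hlen], ?_⟩
  intro row hmem
  rcases List.mem_or_eq_of_mem_set hmem with h | h
  · exact hrow row h
  · subst h
    rw [List.length_set, List.getD_eq_getElem _ _ (by rw [hlen]; exact ha)]
    exact hrow _ (List.getElem_mem _)

theorem getD_set_self {α : Type} (l : List α) (a : Nat) (x : α) (d : α)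
    (h : a < l.length) : (l.set a x).getD a d = x := by
  simp [List.getD_eq_getElem?_getD, List.getElem?_set, h]

theorem getD_set_ne {α : Type} (l : List α) (a b : Nat) (x : α) (d : α)
    (h : a ≠ b) : (l.set a x).getD b d = l.getD b d := by
  simp [List.getD_eq_getElem?_getD, List.getElem?_set, h]

theorem getCell_setCell (m : List (List Int)) (n a b : Nat) (hm : pvShape m n)
    (ha : a < n) (hb : b < n) (i j : Nat) :
    pvGetCell (pvSetCell m a b) i j = if i = a ∧ j = b then 1 else pvGetCell m i j := by
  obtain ⟨hlen, hrow⟩ := hm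
  have ham : a < m.length := by rw [hlen]; exact ha
  have hrlen : (m.getD a []).length = n := by
    rw [List.getD_eq_getElem _ _ ham]; exact hrow _ (List.getElem_mem _)
  unfold pvGetCell pvSetCell
  by_cases hia : i = a
  · subst hia
    rw [getD_set_self _ _ _ _ ham]
    by_cases hjb : j = b
    · subst hjb
      rw [getD_set_self _ _ _ _ (by rw [hrlen]; exact hb)]
      simp
    · rw [getD_set_ne _ _ _ _ _ (fun h => hjb h.symm)]
      simp [hjb]
  · rw [getD_set_ne _ _ _ _ _ (fun h => hia h.symm)]
    simp [hia]

theorem shape_step (n : Nat) (m : List (List Int)) (e : List Int) (hm : pvShape m n) :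
    pvShape (pvStep (n : Int) m e) n := by
  cases e with
  | nil => exact hm
  | cons a t =>
    cases t with
    | nil =>
        show pvShape (if 0 ≤ a ∧ a < (n : Int) then pvSetCell m a.toNat a.toNat else m) n
        by_cases hg : 0 ≤ a ∧ a < (n : Int)
        · rw [if_pos hg]; exact shape_setCell m n _ _ hm (by omega)
        · rw [if_neg hg]; exact hm
    | cons b t2 =>
      cases t2 with
      | nil =>
          show pvShape (if (0 ≤ a ∧ a < (n : Int)) ∧ (0 ≤ b ∧ b < (n : Int)) then
              pvSetCell (pvSetCell m a.toNat b.toNat) b.toNat a.toNat else m) n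
          by_cases hg : (0 ≤ a ∧ a < (n : Int)) ∧ (0 ≤ b ∧ b < (n : Int))
          · rw [if_pos hg]
            exact shape_setCell _ n _ _ (shape_setCell m n _ _ hm (by omega)) (by omega)
          · rw [if_neg hg]; exact hm
      | cons c t3 => exact hm

theorem getCell_step (n : Nat) (m : List (List Int)) (e : List Int) (hm : pvShape m n)
    (i j : Nat) :
    pvGetCell (pvStep (n : Int) m e) i j =
      if pvHits n e i j then 1 else pvGetCell m i j := by
  cases e with
  | nil => simp [pvStep, pvHits]
  | cons a t =>
    cases t with
    | nil =>
        show pvGetCell (if 0 ≤ a ∧ a < (n : Int) then pvSetCell m a.toNat a.toNat else m) i j = _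
        by_cases hg : 0 ≤ a ∧ a < (n : Int)
        · rw [if_pos hg, getCell_setCell m n _ _ hm (by omega) (by omega)]
          simp only [pvHits, decide_eq_true_eq]
          split_ifs with h1 h2 <;> first | rfl | omega
        · rw [if_neg hg]
          simp only [pvHits, decide_eq_true_eq]
          rw [if_neg (fun hc => hg ⟨hc.1, hc.2.1⟩)]
    | cons b t2 =>
      cases t2 with
      | nil =>
          show pvGetCell (if (0 ≤ a ∧ a < (n : Int)) ∧ (0 ≤ b ∧ b < (n : Int)) then
              pvSetCell (pvSetCell m a.toNat b.toNat) b.toNat a.toNat else m) i j = _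
          by_cases hg : (0 ≤ a ∧ a < (n : Int)) ∧ (0 ≤ b ∧ b < (n : Int))
          · rw [if_pos hg,
              getCell_setCell _ n _ _ (shape_setCell m n _ _ hm (by omega)) (by omega) (by omega),
              getCell_setCell m n _ _ hm (by omega) (by omega)]
            simp only [pvHits, decide_eq_true_eq]
            split_ifs with h1 h2 h3 <;> first | rfl | omega
          · rw [if_neg hg]
            simp only [pvHits, decide_eq_true_eq]
            rw [if_neg (fun hc => hg ⟨hc.1, hc.2.1⟩)]
      | cons c t3 => simp [pvStep, pvHits]

theorem shape_fold (n : Nat) (E : List (List Int)) :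
    ∀ (m : List (List Int)), pvShape m n → pvShape (E.foldl (pvStep (n : Int)) m) n := by
  induction E with
  | nil => intro m hm; exact hm
  | cons e es ih => intro m hm; exact ih _ (shape_step n m e hm)

theorem getCell_fold (n : Nat) (E : List (List Int)) :
    ∀ (m : List (List Int)), pvShape m n → ∀ (i j : Nat),
      pvGetCell (E.foldl (pvStep (n : Int)) m) i j =
        if E.any (fun e => pvHits n e i j) then 1 else pvGetCell m i j := by
  induction E with
  | nil => intro m hm i j; simp
  | cons e es ih =>
      intro m hm i j
      simp only [List.foldl, List.any_cons]
      rw [ih _ (shape_step n m e hm), getCell_step n m e hm]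
      by_cases h1 : es.any (fun e => pvHits n e i j) <;> by_cases h2 : pvHits n e i j <;>
        simp [h1, h2]

theorem equal_mem_iff (s t : List Int) :
    PySem.Set.equal s t = true ↔ ((∀ x ∈ s, x ∈ t) ∧ (∀ x ∈ t, x ∈ s)) := by
  simp [PySem.Set.equal, PySem.Set.issubset, PySem.Set.contains, List.contains_iff_mem]

theorem pairSet_self (i : Nat) : pvPairSet (i : Int) (i : Int) = [(i : Int)] := by
  simp [pvPairSet, PySem.Set.add, PySem.Set.empty, PySem.Set.contains]

theorem pairSet_ne (i j : Nat) (h : i ≠ j) :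
    pvPairSet (i : Int) (j : Int) = [(i : Int), (j : Int)] := by
  simp [pvPairSet, PySem.Set.add, PySem.Set.empty, PySem.Set.contains, List.contains_iff_mem]
  omega

theorem equal_pair_iff_hits (n : Nat) (e : List Int) (he : e.Nodup) (i j : Nat)
    (hi : i < n) (hj : j < n) :
    PySem.Set.equal (pvPairSet (i : Int) (j : Int)) e = pvHits n e i j := by
  rw [Bool.eq_iff_iff, equal_mem_iff]
  by_cases hij : i = j
  · subst hij
    rw [pairSet_self]
    cases e with
    | nil => simp [pvHits]
    | cons a t =>
      cases t with
      | nil => simp [pvHits]; omega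
      | cons b t2 =>
        cases t2 with
        | nil =>
            have hab : a ≠ b := fun h => (List.nodup_cons.mp he).1 (by simp [h])
            simp [pvHits]
            omega
        | cons c t3 =>
            have hab : a ≠ b := fun h => (List.nodup_cons.mp he).1 (by simp [h])
            simp only [pvHits, Bool.false_eq_true, iff_false, not_and, List.mem_singleton]
            intro _ h2
            have ha := h2 a (by simp)
            have hb := h2 b (by simp)
            simp only [List.mem_singleton] at ha hb
            omega
  · rw [pairSet_ne i j hij]
    cases e with
    | nil =>
        simp only [pvHits, Bool.false_eq_true, iff_false, not_and]
        intro h1 _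
        exact List.not_mem_nil (h1 (i : Int) (by simp))
    | cons a t =>
      cases t with
      | nil => simp [pvHits]; omega
      | cons b t2 =>
        cases t2 with
        | nil =>
            have hab : a ≠ b := fun h => (List.nodup_cons.mp he).1 (by simp [h])
            simp [pvHits]
            omega
        | cons c t3 =>
            have hab : a ≠ b := fun h => (List.nodup_cons.mp he).1 (by simp [h])
            have hac : a ≠ c := fun h => (List.nodup_cons.mp he).1 (by simp [h])
            have hbc : b ≠ c := fun h => (List.nodup_cons.mp (List.nodup_cons.mp he).2).1 (by simp [h])
            simp only [pvHits, Bool.false_eq_true, iff_false, not_and]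
            intro _ h2
            have ha := h2 a (by simp)
            have hb := h2 b (by simp)
            have hc := h2 c (by simp)
            simp only [List.mem_cons, List.mem_singleton, List.not_mem_nil, or_false] at ha hb hc
            omega

-- ===== VERDICT =====
theorem translate_to_matrix_spec : Claim_equal_translate_to_matrix := by
  intro V E _ hpre
  unfold Spec_translate_to_matrix
  rw [A_char]
  set n := V.length with hn
  have hzero : pvShape (List.replicate n (List.replicate n (0 : Int))) n := by
    constructor
    · simp
    · intro row hrow
      rw [List.eq_of_mem_replicate hrow]; simp
  have hshape := shape_fold n E _ hzero
  unfold translate_to_matrix_alt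
  rw [← hn]
  apply List.ext_getElem
  · simp [hshape.1]
  · intro i h1 h2
    have hi : i < n := by simpa using h1
    apply List.ext_getElem
    · simp only [List.getElem_map, List.getElem_range, List.length_map, List.length_range]
      exact (hshape.2 _ (List.getElem_mem h2)).symm
    · intro j h3 h4
      have hj : j < n := by simpa using h3
      simp only [List.getElem_map, List.getElem_range]
      have hany : (E.any (fun e => PySem.Set.equal (pvPairSet (i : Int) (j : Int)) e))
          = E.any (fun e => pvHits n e i j) := by
        cases hA : E.any (fun e => PySem.Set.equal (pvPairSet (i : Int) (j : Int)) e) with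
        | true =>
            rw [List.any_eq_true] at hA
            obtain ⟨e, heE, hee⟩ := hA
            symm; rw [List.any_eq_true]
            exact ⟨e, heE, by rw [← equal_pair_iff_hits n e (hpre e heE) i j hi hj]; exact hee⟩
        | false =>
            rw [List.any_eq_false] at hA
            symm; rw [List.any_eq_false]
            intro e heE
            rw [← equal_pair_iff_hits n e (hpre e heE) i j hi hj]
            exact hA e heE
      rw [hany]
      have hcell := getCell_fold n E _ hzero i j
      have hzcell : pvGetCell (List.replicate n (List.replicate n (0 : Int))) i j = 0 := by
        unfold pvGetCell
        rw [List.getD_eq_getElem _ _ (show i < (List.replicate n (List.replicate n (0:Int))).length by simpa using hi),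
          List.getElem_replicate, List.getD_eq_getElem?_getD, List.getElem?_replicate]
        split <;> simp
      rw [hzcell] at hcell
      have : pvGetCell (E.foldl (pvStep (n : Int)) (List.replicate n (List.replicate n 0))) i j
          = (E.foldl (pvStep (n : Int)) (List.replicate n (List.replicate n 0)))[i][j] := by
        unfold pvGetCell
        rw [List.getD_eq_getElem _ _ h2, List.getD_eq_getElem _ _ h4]
      rw [← this, hcell]
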